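-- pv_equiv track=rewrite | github.com/crap0101/laundry_basket | merge_sort_and_Injecretor.py | sort_two
-- ===== SOURCE A (Python) =====
-- import itertools
-- from typing import Callable, Collection, Iterable, Sequence
--
-- def sort_two (seq: Sequence) -> Sequence:
--     """Return sorted seqs of items, two by two.
--     Items must support the `>` operator."""
--     pairs = []
--     for lst in takes(seq, 2):
--         if len(lst) == 1:
--             pairs.append(tuple(lst))
--         else:
--             a, b = lst
--             pairs.append((b,a) if a > b else (a, b))
--     return pairs
--
-- def takes (seq: Sequence, n: int) -> Iterable:
--     """Yields chunk of `n` items a times from `seq`"""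
--     it = iter(seq)
--     while True:
--         p = tuple(itertools.islice(it, 0, n))
--         if not p:
--             return
--         yield p
-- ===== SOURCE B (Python) =====
-- def sort_two(seq):
--     """Return sorted seqs of items, two by two.
--     Items must support the `>` operator."""
--     evens = seq[::2]
--     odds = seq[1::2]
--     pairs = [(b, a) if a > b else (a, b) for a, b in zip(evens, odds)]
--     if len(seq) % 2 == 1:
--         pairs.append((seq[-1],))
--     return pairs
-- ===== Notes on version B (the rewrite author's own statement) =====
-- stated objective: simpler
-- what changed: Replaces the chunking generator (takes) plus explicit accumulator loop by two strided slices zipped together with a comprehension, appending the odd-length leftover as a one-tuple.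
import Mathlib
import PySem

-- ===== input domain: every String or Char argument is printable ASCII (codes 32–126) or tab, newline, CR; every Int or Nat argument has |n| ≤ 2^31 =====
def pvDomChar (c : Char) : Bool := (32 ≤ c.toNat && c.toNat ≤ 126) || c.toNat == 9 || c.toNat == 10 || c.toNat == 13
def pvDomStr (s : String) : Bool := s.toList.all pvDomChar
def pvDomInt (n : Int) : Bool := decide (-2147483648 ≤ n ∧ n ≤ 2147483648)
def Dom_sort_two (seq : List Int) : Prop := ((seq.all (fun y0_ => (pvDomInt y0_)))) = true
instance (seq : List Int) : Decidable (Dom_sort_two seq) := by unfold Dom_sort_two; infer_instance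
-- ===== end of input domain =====

-- B replaces A's chunking generator + accumulator loop by two strided slices zipped into a comprehension (simpler decomposition, same cost).


-- ===== PORT A =====
-- A consumes the sequence in chunks of 2 (the 'takes' generator) and appends to an
-- accumulator: for a chunk of one item, that singleton; for a pair, the sorted pair.
-- Transcribed as structural two-step recursion: one step = one chunk of 'takes seq 2'.
def sort_two (seq : List Int) : List (List Int) :=
  match seq with
  | [] => []
  | [a] => [[a]]
  | a :: b :: rest => (if a > b then [b, a] else [a, b]) :: sort_two rest

-- ===== PORT B =====
-- B: evens = seq[::2], odds = seq[1::2], zip them, sort each pair with a comprehension,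
-- then append the odd-length leftover seq[-1] as a one-tuple.
def sort_two_alt (seq : List Int) : List (List Int) :=
  let evens := (PySem.List.slice? seq none none 2).getD []
  let odds := (PySem.List.slice? seq (some 1) none 2).getD []
  let pairs := (evens.zip odds).map (fun p => if p.1 > p.2 then [p.2, p.1] else [p.1, p.2])
  if seq.length % 2 == 1 then
    match PySem.List.pyGet? seq (-1) with
    | some x => pairs ++ [[x]]
    | none => pairs
  else pairs

-- ===== PRECONDITION & SPEC =====
def Spec_sort_two (seq : List Int) (out : List (List Int)) : Prop := out = sort_two_alt seq
instance (seq : List Int) (out : List (List Int)) : Decidable (Spec_sort_two seq out) := by unfold Spec_sort_two; infer_instance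

-- ===== CLAIM (what is proved, stated in full; the proofs are below) =====
def Claim_equal_sort_two : Prop := ∀ (seq : List Int), Dom_sort_two seq → Spec_sort_two seq (sort_two seq)

-- ===== LEMMAS AND PROOFS =====

-- the elements at even indices, in order (the value of seq[::2])
def pvEvens : List Int → List Int
  | [] => []
  | [a] => [a]
  | a :: _ :: r => a :: pvEvens r

theorem pvEvens_cons_tail (b : Int) (r : List Int) :
    pvEvens (b :: r) = b :: pvEvens r.tail := by
  cases r <;> simp [pvEvens]

-- seq[::2] in filterMap-over-range form equals pvEvens
theorem pv_filterMap_evens (xs : List Int) :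
    (List.range ((xs.length + 1) / 2)).filterMap (fun k => xs[2 * k]?) = pvEvens xs := by
  induction xs using pvEvens.induct with
  | case1 => simp [pvEvens]
  | case2 a => simp [pvEvens]
  | case3 a b r ih =>
    have hlen : ((a :: b :: r).length + 1) / 2 = (r.length + 1) / 2 + 1 := by
      simp; omega
    rw [hlen, List.range_succ_eq_map, List.filterMap_cons, List.filterMap_map]
    simp only [Nat.mul_zero, List.getElem?_cons_zero]
    have : ∀ k : Nat, (a :: b :: r)[2 * (k + 1)]? = r[2 * k]? := by
      intro k
      have h2 : 2 * (k + 1) = 2 * k + 1 + 1 := by omega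
      rw [h2]; simp
    simp only [Function.comp_def, this, pvEvens]
    rw [ih]

-- seq[1::2] in filterMap-over-range form equals pvEvens of the tail
theorem pv_filterMap_odds (xs : List Int) :
    (List.range (xs.length / 2)).filterMap (fun k => xs[2 * k + 1]?) = pvEvens xs.tail := by
  induction xs using pvEvens.induct with
  | case1 => simp [pvEvens]
  | case2 a => simp [pvEvens]
  | case3 a b r ih =>
    have hlen : (a :: b :: r).length / 2 = r.length / 2 + 1 := by
      simp; omega
    rw [hlen, List.range_succ_eq_map, List.filterMap_cons, List.filterMap_map]
    have hfun : ((fun k => (a :: b :: r)[2 * k + 1]?) ∘ Nat.succ) = (fun k => r[2 * k + 1]?) := by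
      funext k
      have h2 : 2 * (k.succ) + 1 = 2 * k + 1 + 1 + 1 := by omega
      simp [Function.comp, h2]
    rw [hfun, ih]
    simp [pvEvens_cons_tail]

theorem pv_slice2_evens (xs : List Int) :
    PySem.List.slice? xs none none 2 = some (pvEvens xs) := by
  rw [← pv_filterMap_evens]
  simp only [PySem.List.slice?, PySem.List.sliceIndices]
  norm_num
  have hc : (if 0 < xs.length then (((xs.length : Int) + 2 - 1) / 2).toNat else 0)
      = (xs.length + 1) / 2 := by split <;> omega
  rw [hc]
  congr 1

theorem pv_slice2_odds (xs : List Int) :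
    PySem.List.slice? xs (some 1) none 2 = some (pvEvens xs.tail) := by
  rw [← pv_filterMap_odds]
  simp only [PySem.List.slice?, PySem.List.sliceIndices]
  norm_num
  cases xs with
  | nil => simp
  | cons a r =>
    have hmin : min (1 : Int) (((a :: r).length : Int)) = 1 := by
      simp
    rw [hmin]
    have hc : (if 1 < (a :: r).length then ((((a :: r).length : Int) - 1 + 2 - 1) / 2).toNat else 0)
        = (a :: r).length / 2 := by
      split <;> omega
    rw [hc]
    congr 1
    funext k
    congr 1
    omega

theorem pv_main (seq : List Int) : sort_two seq = sort_two_alt seq := by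
  induction seq using pvEvens.induct with
  | case1 => simp [sort_two, sort_two_alt, pv_slice2_evens, pv_slice2_odds, pvEvens]
  | case2 a =>
    simp [sort_two, sort_two_alt, pv_slice2_evens, pv_slice2_odds, pvEvens,
      PySem.List.pyGet?, PySem.List.pyIdx?]
  | case3 a b r ih =>
    rw [sort_two, ih]
    simp only [sort_two_alt, pv_slice2_evens, pv_slice2_odds, Option.getD_some,
      List.tail_cons, pvEvens, pvEvens_cons_tail, List.zip_cons_cons, List.map_cons]
    have hpar : ((a :: b :: r).length % 2 == 1) = (r.length % 2 == 1) := by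
      have h : (a :: b :: r).length % 2 = r.length % 2 := by simp; omega
      rw [h]
    rw [hpar]
    cases hodd : (r.length % 2 == 1) with
    | false => simp
    | true =>
      have hne : r.length ≠ 0 := by
        intro h0; rw [h0] at hodd; simp at hodd
      have hget : PySem.List.pyGet? (a :: b :: r) (-1) = PySem.List.pyGet? r (-1) := by
        simp only [PySem.List.pyGet?, PySem.List.pyIdx?, List.length_cons]
        have h2 : ¬ ((0:Int) ≤ -1) := by omega
        have h3 : (-(((r.length + 1 + 1 : Nat)):Int) ≤ -1) := by omega
        have h4 : (-((r.length : Nat):Int) ≤ -1) := by omega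
        rw [if_neg h2, if_pos h3, if_neg h2, if_pos h4]
        have e1 : r.length + 1 + 1 - ((-(-1:Int)).toNat) = r.length + 1 := by norm_num
        have e2 : r.length - ((-(-1:Int)).toNat) = r.length - 1 := by norm_num
        rw [e1, e2]
        obtain ⟨n, hn⟩ : ∃ n, r.length = n + 1 := ⟨r.length - 1, by omega⟩
        rw [hn]
        simp
      simp only [hget]
      cases hg : PySem.List.pyGet? r (-1) <;> simp

-- ===== VERDICT (by name: the statement is the Claim_ definition above) =====
theorem sort_two_spec : Claim_equal_sort_two := by
  intro seq _
  unfold Spec_sort_two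
  exact pv_main seq
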